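-- pv_equiv track=rewrite | github.com/rahulswimmer/scalar_assignments_hw | elementsRemoval.py | solve
-- ===== SOURCE A (Python) =====
-- def solve(A):
--     sumArr = sum(A)
--     ans = 0
--     A.sort()
--     for i in range(len(A)-1, -1, -1):
--         ans += sumArr
--         sumArr -= A[i]
--     return ans
-- ===== SOURCE B (Python) =====
-- def solve(A):
--     A.sort()
--     n = len(A)
--     return sum(a * (n - i) for i, a in enumerate(A))
-- ===== Notes on version B (the rewrite author's own statement) =====
-- stated objective: simpler
-- what changed: Replaces the reverse loop threading a decremented running suffix total through mutable state with a direct closed-form weighted sum: each sorted element contributes A[i]*(n-i).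
import Mathlib
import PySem

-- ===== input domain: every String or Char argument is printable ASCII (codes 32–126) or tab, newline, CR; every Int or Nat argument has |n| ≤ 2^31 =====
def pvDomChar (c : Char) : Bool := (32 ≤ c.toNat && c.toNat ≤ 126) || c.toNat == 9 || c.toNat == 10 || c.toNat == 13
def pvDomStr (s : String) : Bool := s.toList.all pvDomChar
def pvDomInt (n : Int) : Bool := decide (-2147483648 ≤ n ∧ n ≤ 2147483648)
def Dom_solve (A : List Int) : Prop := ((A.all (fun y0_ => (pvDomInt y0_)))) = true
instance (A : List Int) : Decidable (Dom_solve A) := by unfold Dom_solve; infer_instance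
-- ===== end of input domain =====

-- B replaces A's reverse loop (running suffix total) with the closed-form weighted sum
-- Σ sorted(A)[i]*(n-i): simpler, same cost. Both sort the argument in place in Python;
-- the equivalence proved here is about the return value only.

-- ===== PORT A =====
-- i always lies in range, so pyGetD with default 0 is exact here
def solve (A : List Int) : Int :=
  let sumArr := A.sum
  let ans : Int := 0
  let s := PySem.List.sorted A (fun x => x) false
  let st := (PySem.List.pyRange ((s.length : Int) - 1) (-1) (-1)).foldl
    (fun (p : Int × Int) i => (p.1 + p.2, p.2 - PySem.List.pyGetD s i 0)) (ans, sumArr)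
  st.1

-- ===== PORT B =====
def solve_alt (A : List Int) : Int :=
  let s := PySem.List.sorted A (fun x => x) false
  let n : Int := s.length
  ((PySem.List.enumerate s 0).map (fun p => p.2 * (n - p.1))).sum

-- ===== PRECONDITION & SPEC =====
def Spec_solve (A : List Int) (out : Int) : Prop := out = solve_alt A
instance (A : List Int) (out : Int) : Decidable (Spec_solve A out) := by unfold Spec_solve; infer_instance

-- ===== CLAIM (what is proved, stated in full; the proofs are below) =====
def Claim_equal_solve : Prop := ∀ (A : List Int), Dom_solve A → Spec_solve A (solve A)

-- ===== LEMMAS AND PROOFS =====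

-- A's loop on an arbitrary list L (with the running total seeded at L.sum) equals B's
-- weighted sum, proved by induction on L from the back.
lemma loop_eq (L : List Int) (a0 : Int) :
    ((PySem.List.pyRange ((L.length : Int) - 1) (-1) (-1)).foldl
      (fun (p : Int × Int) i => (p.1 + p.2, p.2 - PySem.List.pyGetD L i 0)) (a0, L.sum)).1
    = a0 + ((PySem.List.enumerate L 0).map (fun p => p.2 * ((L.length : Int) - p.1))).sum := by
  induction L using List.reverseRecOn generalizing a0 with
  | nil => simp [PySem.List.pyRange_neg_one_eq_nil]
  | append_singleton L' x ih =>
    have hlen : ((L' ++ [x]).length : Int) = (L'.length : Int) + 1 := by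
      simp
    have hrange : PySem.List.pyRange (((L' ++ [x]).length : Int) - 1) (-1) (-1)
        = ((L'.length : Int)) :: PySem.List.pyRange ((L'.length : Int) - 1) (-1) (-1) := by
      rw [hlen]
      have : ((L'.length : Int) + 1 - 1) = (L'.length : Int) := by ring
      rw [this, PySem.List.pyRange_neg_one_cons (by omega)]
    rw [hrange]
    simp only [List.foldl_cons]
    -- first step of the loop
    have hget : PySem.List.pyGetD (L' ++ [x]) (L'.length : Int) 0 = x := by
      rw [PySem.List.pyGetD_natCast]
      simp
    have hsum : (L' ++ [x]).sum = L'.sum + x := by simp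
    have hstate : ((a0 : Int) + (L' ++ [x]).sum,
        (L' ++ [x]).sum - PySem.List.pyGetD (L' ++ [x]) (L'.length : Int) 0)
        = ((a0 + (L'.sum + x) : Int), L'.sum) := by
      rw [hget, hsum]
      have h : L'.sum + x - x = L'.sum := by ring
      rw [h]
    rw [hstate]
    have hcong : (PySem.List.pyRange ((L'.length : Int) - 1) (-1) (-1)).foldl
        (fun (p : Int × Int) i => (p.1 + p.2, p.2 - PySem.List.pyGetD (L' ++ [x]) i 0))
        ((a0 + (L'.sum + x) : Int), L'.sum)
      = (PySem.List.pyRange ((L'.length : Int) - 1) (-1) (-1)).foldl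
        (fun (p : Int × Int) i => (p.1 + p.2, p.2 - PySem.List.pyGetD L' i 0))
        ((a0 + (L'.sum + x) : Int), L'.sum) := by
      apply PySem.List.foldl_congr_mem
      intro acc i hi
      have hi' := (PySem.List.mem_pyRange_neg_one).1 hi
      have h0 : (0:Int) ≤ i := by omega
      have h1 : i < (L'.length : Int) := by omega
      have hL : PySem.List.pyGetD (L' ++ [x]) i 0 = PySem.List.pyGetD L' i 0 := by
        rw [PySem.List.pyGetD_eq_getElem _ _ h0 (by simp; omega),
            PySem.List.pyGetD_eq_getElem _ _ h0 h1]
        exact List.getElem_append_left (by omega)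
      rw [hL]
    rw [hcong, ih]
    -- now pure sum arithmetic on the RHS
    have henum : PySem.List.enumerate (L' ++ [x]) 0
        = PySem.List.enumerate L' 0 ++ [((L'.length : Int), x)] := by
      rw [PySem.List.enumerate_append]
      simp [PySem.List.enumerate_cons]
    rw [henum, hlen]
    simp only [List.map_append, List.sum_append, List.map_cons, List.map_nil, List.sum_cons,
      List.sum_nil]
    have hshift : ((PySem.List.enumerate L' 0).map
          (fun p => p.2 * ((L'.length : Int) + 1 - p.1))).sum
        = ((PySem.List.enumerate L' 0).map (fun p => p.2 * ((L'.length : Int) - p.1))).sum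
          + L'.sum := by
      have hfun : ((PySem.List.enumerate L' 0).map
            (fun p => p.2 * ((L'.length : Int) + 1 - p.1)))
          = ((PySem.List.enumerate L' 0).map
            (fun p => p.2 * ((L'.length : Int) - p.1) + p.2)) := by
        apply List.map_congr_left
        intro p _
        ring
      rw [hfun, PySem.List.sum_map_add_int]
      have h2 : ((PySem.List.enumerate L' 0).map (fun p : Int × Int => p.2)).sum = L'.sum := by
        rw [PySem.List.map_snd_enumerate]
      rw [h2]
    rw [hshift]
    ring

-- ===== VERDICT (by name: the statement is the Claim_ definition above) =====
theorem solve_spec : Claim_equal_solve := by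
  intro A _
  show solve A = solve_alt A
  simp only [solve, solve_alt]
  have hs : (PySem.List.sorted A (fun x => x) false).sum = A.sum :=
    (PySem.List.sorted_perm A (fun x => x) false).sum_eq
  rw [← hs, loop_eq, zero_add]
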